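-- pv_equiv track=rewrite | github.com/WaRHaMMeRBoT/PPOIS-labs-spring-2023 | LR1/Pests.py | createDamage
-- ===== SOURCE A (Python) =====
-- NAME_PESTS = ["Aphid", "Ant", "Slug", "Whitefly", "Nematode", "Leaf beetle", "Moth", "Mouse", "Rat", "Mole"]
--
-- DAMAGE_PEST5 = 5
--
-- DAMAGE_PEST6 = 6
--
-- DAMAGE_PEST10 = 10
--
-- def createDamage(name):
--     counter = 0
--     for i in NAME_PESTS:
--         if(name == NAME_PESTS[counter]):
--             if(counter < 3):
--                 return DAMAGE_PEST5
--             elif(counter > 2 and counter < 8):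
--                 return DAMAGE_PEST6
--             else:
--                 return DAMAGE_PEST10
--             break
--         counter += 1
-- ===== SOURCE B (Python) =====
-- # Inverted mapping: iterate over the three damage classes and test group membership,
-- # instead of scanning pest names and deriving the damage from index thresholds.
-- DAMAGE_GROUPS = [
--     (5, frozenset({"Aphid", "Ant", "Slug"})),
--     (6, frozenset({"Whitefly", "Nematode", "Leaf beetle", "Moth", "Mouse"})),
--     (10, frozenset({"Rat", "Mole"})),
-- ]
--
-- def createDamage(name):
--     for damage, pests in DAMAGE_GROUPS:
--         if name in pests:
--             return damage
--     return None
-- ===== Notes on version B (the rewrite author's own statement) =====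
-- stated objective: alternative
-- what changed: B inverts the mapping: it groups pests by damage value and scans the three (damage, group) pairs with a set-membership test, replacing A's scan over pest names with index-threshold branches; no counter or index arithmetic remains.
import Mathlib
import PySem

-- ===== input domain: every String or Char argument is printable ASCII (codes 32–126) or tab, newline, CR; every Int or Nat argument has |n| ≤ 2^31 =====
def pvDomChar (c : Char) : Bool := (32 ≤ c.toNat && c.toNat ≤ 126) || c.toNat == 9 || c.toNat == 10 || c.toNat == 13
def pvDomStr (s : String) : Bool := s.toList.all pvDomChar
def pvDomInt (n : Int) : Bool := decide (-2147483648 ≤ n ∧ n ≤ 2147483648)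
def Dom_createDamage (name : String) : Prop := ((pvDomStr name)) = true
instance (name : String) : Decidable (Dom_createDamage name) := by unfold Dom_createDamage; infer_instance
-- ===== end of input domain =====

-- B inverts the mapping: it scans the three (damage, pest-set) groups with a membership test, replacing A's name scan with index-threshold branches (alternative).

-- ===== PORT A =====
def NAME_PESTS : List String :=
  ["Aphid", "Ant", "Slug", "Whitefly", "Nematode", "Leaf beetle", "Moth", "Mouse", "Rat", "Mole"]

def DAMAGE_PEST5 : Int := 5
def DAMAGE_PEST6 : Int := 6
def DAMAGE_PEST10 : Int := 10

-- the for-loop over NAME_PESTS with its manual counter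
def createDamageLoop (name : String) : List String → Int → Option Int
  | [], _ => none
  | _ :: rest, counter =>
    match PySem.List.pyGet? NAME_PESTS counter with
    | none => none   -- unreachable: counter stays in range while the loop runs
    | some s =>
      if name == s then
        if counter < 3 then some DAMAGE_PEST5
        else if counter > 2 && counter < 8 then some DAMAGE_PEST6
        else some DAMAGE_PEST10
      else createDamageLoop name rest (counter + 1)

def createDamage (name : String) : Option Int :=
  createDamageLoop name NAME_PESTS 0

-- ===== PORT B =====
def DAMAGE_GROUPS : List (Int × PySem.Set String) :=
  [(5, PySem.Set.ofList ["Aphid", "Ant", "Slug"]),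
   (6, PySem.Set.ofList ["Whitefly", "Nematode", "Leaf beetle", "Moth", "Mouse"]),
   (10, PySem.Set.ofList ["Rat", "Mole"])]

-- the for-loop over DAMAGE_GROUPS: return the first damage whose group contains name
def createDamageGroups (name : String) : List (Int × PySem.Set String) → Option Int
  | [] => none
  | (damage, pests) :: rest =>
    if PySem.Set.contains pests name then some damage
    else createDamageGroups name rest

def createDamage_alt (name : String) : Option Int :=
  createDamageGroups name DAMAGE_GROUPS

-- ===== PRECONDITION & SPEC =====
def Spec_createDamage (name : String) (out : Option Int) : Prop := out = createDamage_alt name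
instance (name : String) (out : Option Int) : Decidable (Spec_createDamage name out) := by unfold Spec_createDamage; infer_instance

-- ===== CLAIM =====
def Claim_equal_createDamage : Prop := ∀ (name : String), Dom_createDamage name → Spec_createDamage name (createDamage name)

-- ===== LEMMAS AND PROOFS =====
theorem createDamage_eq (name : String) :
    createDamage name = createDamage_alt name := by
  by_cases h0 : name = "Aphid"; · subst h0; decide
  by_cases h1 : name = "Ant"; · subst h1; decide
  by_cases h2 : name = "Slug"; · subst h2; decide
  by_cases h3 : name = "Whitefly"; · subst h3; decide
  by_cases h4 : name = "Nematode"; · subst h4; decide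
  by_cases h5 : name = "Leaf beetle"; · subst h5; decide
  by_cases h6 : name = "Moth"; · subst h6; decide
  by_cases h7 : name = "Mouse"; · subst h7; decide
  by_cases h8 : name = "Rat"; · subst h8; decide
  by_cases h9 : name = "Mole"; · subst h9; decide
  -- name matches no pest: both sides are none
  simp [createDamage, createDamage_alt, createDamageLoop, createDamageGroups,
    NAME_PESTS, DAMAGE_GROUPS, PySem.Set.contains, PySem.Set.ofList,
    PySem.List.pyGet?, PySem.List.pyIdx?,
    h0, h1, h2, h3, h4, h5, h6, h7, h8, h9]

-- ===== VERDICT =====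
theorem createDamage_spec : Claim_equal_createDamage := by
  intro name _
  unfold Spec_createDamage
  exact createDamage_eq name
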